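-- pv_equiv track=rewrite | github.com/ayoubzulfiqar/Leetcode-Medium | SmallestMissingNon-negativeIntegerAfterOperations/smallest_missing_non-negative_integer_after_operations.py | findMaximumMEX
-- ===== SOURCE A (Python) =====
-- import collections
--
-- def findMaximumMEX(nums: list[int], value: int) -> int:
--     remainder_counts = collections.Counter()
--     for num in nums:
--         remainder_counts[num % value] += 1
--
--     mex = 0
--     while True:
--         target_remainder = mex % value
--         if remainder_counts[target_remainder] > 0:
--             remainder_counts[target_remainder] -= 1
--             mex += 1
--         else:
--             break
--
--     return mex
-- ===== SOURCE B (Python) =====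
-- import collections
--
--
-- def findMaximumMEX(nums: list[int], value: int) -> int:
--     # Closed form instead of a step-by-step simulation: the integer q*value + r
--     # is producible iff q < counts[r], so the first gap within residue class r
--     # is counts[r]*value + r, and the MEX is the minimum of these over all r.
--     # The MEX never exceeds len(nums), so residues beyond len(nums) cannot win.
--     counts = collections.Counter(num % value for num in nums)
--     return min(counts[r] * value + r for r in range(min(value, len(nums) + 1)))
-- ===== Notes on version B (the rewrite author's own statement) =====
-- stated objective: simpler
-- what changed: Replaces the step-by-step while-loop simulation of the MEX with a closed-form minimum over residue classes (the first gap in class r is counts[r]*value + r); Pre_ restricts to the problem's natural domain value >= 1 and so excludes value = 0 (where A raises ZeroDivisionError) and negative value, where A's returned value is an accident of Python's negative modulo and B raises on the empty range.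
-- outside the precondition, e.g. on findMaximumMEX([0, 1], -2): A returns 2, B raises ValueError; on findMaximumMEX([1], 0): A raises ZeroDivisionError, B raises ZeroDivisionError
import Mathlib
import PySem

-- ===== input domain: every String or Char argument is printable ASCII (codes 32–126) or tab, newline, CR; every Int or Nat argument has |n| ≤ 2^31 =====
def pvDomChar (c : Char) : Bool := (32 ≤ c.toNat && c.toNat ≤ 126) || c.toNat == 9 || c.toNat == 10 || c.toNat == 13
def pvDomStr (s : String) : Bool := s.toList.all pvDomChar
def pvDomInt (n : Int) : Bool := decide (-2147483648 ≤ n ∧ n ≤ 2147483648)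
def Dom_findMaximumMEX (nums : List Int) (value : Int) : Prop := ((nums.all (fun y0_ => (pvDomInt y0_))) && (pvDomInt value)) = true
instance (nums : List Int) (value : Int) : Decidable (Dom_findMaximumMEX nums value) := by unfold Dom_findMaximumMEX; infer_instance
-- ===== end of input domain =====

-- B replaces A's step-by-step MEX simulation by a closed-form minimum over residue classes (objective: simpler).

-- ===== PORT A =====
-- the 'while True' loop of A; it runs at most (total count) times, so fuel = nums.length + 1 is never exhausted
def mexLoopA (value : Int) (counts : PySem.Dict Int Int) (mex : Int) : Nat → Int
  | 0 => mex
  | fuel + 1 =>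
    if counts.getD (PySem.Int.mod mex value) 0 > 0 then
      mexLoopA value (counts.modify (PySem.Int.mod mex value) 0 (· - 1)) (mex + 1) fuel
    else mex

def findMaximumMEX (nums : List Int) (value : Int) : Int :=
  mexLoopA value
    (nums.foldl (fun d num => d.modify (PySem.Int.mod num value) 0 (· + 1)) PySem.Dict.empty)
    0 (nums.length + 1)

-- ===== PORT B =====
def findMaximumMEX_alt (nums : List Int) (value : Int) : Int :=
  match PySem.List.min?
      ((PySem.List.pyRange 0 (min value ((nums.length : Int) + 1)) 1).map
        (fun r => (PySem.Dict.counter (nums.map (fun num => PySem.Int.mod num value))).getD r 0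
            * value + r))
      (fun x => x) with
  | some m => m
  | none => 0  -- Python's min raises on an empty range; reachable only for value ≤ 0, excluded by Pre_

-- ===== PRECONDITION & SPEC =====
-- Pre_ is the problem's natural domain value ≥ 1: for value = 0 A raises ZeroDivisionError, and for
-- negative value A's returned value is an accident of Python's negative modulo (B raises there).
def Pre_findMaximumMEX (nums : List Int) (value : Int) : Prop := 0 < value
instance (nums : List Int) (value : Int) : Decidable (Pre_findMaximumMEX nums value) := by unfold Pre_findMaximumMEX; infer_instance
def pvWitness_findMaximumMEX : List Int × Int := ([1, 3, 4], 2)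

def Spec_findMaximumMEX (nums : List Int) (value : Int) (out : Int) : Prop := out = findMaximumMEX_alt nums value
instance (nums : List Int) (value : Int) (out : Int) : Decidable (Spec_findMaximumMEX nums value out) := by unfold Spec_findMaximumMEX; infer_instance

-- ===== CLAIM (what is proved, stated in full; the proofs are below) =====
def Claim_equal_findMaximumMEX : Prop := ∀ (nums : List Int) (value : Int), Dom_findMaximumMEX nums value → Pre_findMaximumMEX nums value → Spec_findMaximumMEX nums value (findMaximumMEX nums value)

-- ===== LEMMAS AND PROOFS =====

-- value ∣ (a - a % value): Python's mod is a representative of a modulo value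
lemma dvd_sub_pymod (value a : Int) : value ∣ (a - PySem.Int.mod a value) := by
  refine ⟨PySem.Int.floordiv a value, ?_⟩
  have h := PySem.Int.floordiv_mul_add_mod a value
  rw [mul_comm]; linarith

lemma pymod_eq_pymod_iff (value a b : Int) (hv : 0 < value) :
    PySem.Int.mod a value = PySem.Int.mod b value ↔ value ∣ (a - b) := by
  constructor
  · intro h
    have ha := dvd_sub_pymod value a
    have hb := dvd_sub_pymod value b
    have e : a - b = (a - PySem.Int.mod a value) - (b - PySem.Int.mod b value) := by rw [h]; ring
    rw [e]; exact dvd_sub ha hb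
  · intro h
    have ha := dvd_sub_pymod value a
    have hb := dvd_sub_pymod value b
    have hd : value ∣ (PySem.Int.mod a value - PySem.Int.mod b value) := by
      have e : PySem.Int.mod a value - PySem.Int.mod b value
          = (b - PySem.Int.mod b value) - (a - PySem.Int.mod a value) + (a - b) := by ring
      rw [e]; exact dvd_add (dvd_sub hb ha) h
    have b1l := PySem.Int.mod_nonneg (a := a) hv
    have b1r := PySem.Int.mod_lt (a := a) hv
    have b2l := PySem.Int.mod_nonneg (a := b) hv
    have b2r := PySem.Int.mod_lt (a := b) hv
    have hz : PySem.Int.mod a value - PySem.Int.mod b value = 0 :=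
      Int.eq_zero_of_abs_lt_dvd hd (by rw [abs_lt]; omega)
    omega

lemma pymod_self (value j : Int) (hv : 0 < value) (h1 : 0 ≤ j) (h2 : j < value) :
    PySem.Int.mod j value = j := by
  have hd := dvd_sub_pymod value j
  have hl := PySem.Int.mod_nonneg (a := j) hv
  have hr := PySem.Int.mod_lt (a := j) hv
  have hz : j - PySem.Int.mod j value = 0 :=
    Int.eq_zero_of_abs_lt_dvd hd (by rw [abs_lt]; omega)
  omega

lemma pymod_add_ne (value a k : Int) (hv : 0 < value) (h1 : 0 < k) (h2 : k < value) :
    PySem.Int.mod (a + k) value ≠ PySem.Int.mod a value := by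
  intro h
  have hd : value ∣ k := by
    have := (pymod_eq_pymod_iff value (a + k) a hv).1 h
    simpa using this
  have : value ≤ k := Int.le_of_dvd h1 hd
  omega

lemma pymod_add_value (value a : Int) (hv : 0 < value) :
    PySem.Int.mod (a + value) value = PySem.Int.mod a value := by
  refine (pymod_eq_pymod_iff value (a + value) a hv).2 ?_
  simp

-- min-fold toolbox
lemma add_foldl_min (c : Int) : ∀ (l : List Int) (a : Int),
    (l.map (fun x => c + x)).foldl min (c + a) = c + l.foldl min a
  | [], _ => rfl
  | x :: l, a => by
    simp only [List.map_cons, List.foldl_cons]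
    rw [min_add_add_left c a x]
    exact add_foldl_min c l (min a x)

lemma foldl_min_eq_foldl_min (a b : Int) (l1 l2 : List Int)
    (h1 : b = a ∨ b ∈ l1) (h2 : ∀ x ∈ l2, x = a ∨ x ∈ l1)
    (h1' : a = b ∨ a ∈ l2) (h2' : ∀ x ∈ l1, x = b ∨ x ∈ l2) :
    l1.foldl min a = l2.foldl min b := by
  have A1 := PySem.List.foldl_min_le l1 a
  have A2 := PySem.List.foldl_min_le l2 b
  apply le_antisymm
  · rcases PySem.List.foldl_min_mem l2 b with h | h
    · rw [h]; rcases h1 with rfl | hb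
      · exact A1.1
      · exact A1.2 _ hb
    · rcases h2 _ h with he | hx
      · rw [he]; exact A1.1
      · exact A1.2 _ hx
  · rcases PySem.List.foldl_min_mem l1 a with h | h
    · rw [h]; rcases h1' with rfl | ha
      · exact A2.1
      · exact A2.2 _ ha
    · rcases h2' _ h with he | hx
      · rw [he]; exact A2.1
      · exact A2.2 _ hx

-- the closed-form value the loop computes: first gap over the value residue classes, seen from mex
def gapMin (d : PySem.Dict Int Int) (value mex : Int) : Int :=
  ((PySem.List.pyRange 0 value 1).map
    (fun j => d.getD (PySem.Int.mod (mex + j) value) 0 * value + j)).foldl min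
    (d.getD (PySem.Int.mod mex value) 0 * value)

-- total remaining budget in one window of value consecutive classes
def winSum (d : PySem.Dict Int Int) (value mex : Int) : Int :=
  ((PySem.List.pyRange 0 value 1).map
    (fun j => d.getD (PySem.Int.mod (mex + j) value) 0)).sum

lemma winSum_nonneg (d : PySem.Dict Int Int) (value mex : Int)
    (hnn : ∀ t, 0 ≤ d.getD t 0) : 0 ≤ winSum d value mex := by
  apply List.sum_nonneg
  intro x hx
  obtain ⟨j, _, rfl⟩ := List.mem_map.1 hx
  exact hnn _

lemma gapMin_zero (d : PySem.Dict Int Int) (value mex : Int) (hv : 0 < value)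
    (h0 : d.getD (PySem.Int.mod mex value) 0 = 0)
    (hnn : ∀ t, 0 ≤ d.getD t 0) : gapMin d value mex = 0 := by
  unfold gapMin
  rw [h0, zero_mul]
  apply le_antisymm (PySem.List.foldl_min_le _ _).1
  rcases PySem.List.foldl_min_mem
      ((PySem.List.pyRange 0 value 1).map
        (fun j => d.getD (PySem.Int.mod (mex + j) value) 0 * value + j)) 0 with h | h
  · omega
  · obtain ⟨j, hj, he⟩ := List.mem_map.1 h
    have hjb := (PySem.List.mem_pyRange_one).1 hj
    have : 0 ≤ d.getD (PySem.Int.mod (mex + j) value) 0 * value :=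
      mul_nonneg (hnn _) (by omega)
    omega

lemma getD_modify_sub (d : PySem.Dict Int Int) (t0 t : Int) :
    (d.modify t0 0 (· - 1)).getD t 0 = if t = t0 then d.getD t0 0 - 1 else d.getD t 0 :=
  PySem.Dict.getD_modify d t0 t 0 (· - 1)

lemma gapMin_step (d : PySem.Dict Int Int) (value mex : Int) (hv : 0 < value)
    (_hpos : 0 < d.getD (PySem.Int.mod mex value) 0) :
    gapMin d value mex
      = 1 + gapMin (d.modify (PySem.Int.mod mex value) 0 (· - 1)) value (mex + 1) := by
  unfold gapMin
  rw [← add_foldl_min 1, List.map_map]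
  simp only [Function.comp_def]
  apply foldl_min_eq_foldl_min
  · -- B's init is A's init (value = 1) or A's term at j = 1
    by_cases h1 : value = 1
    · left
      have e : PySem.Int.mod (mex + 1) value = PySem.Int.mod mex value := by
        rw [show (1 : Int) = value from h1.symm]; exact pymod_add_value value mex hv
      rw [e, getD_modify_sub, if_pos rfl, h1]; ring
    · right
      refine List.mem_map.2 ⟨1, PySem.List.mem_pyRange_one.2 ⟨by omega, by omega⟩, ?_⟩
      rw [getD_modify_sub, if_neg (pymod_add_ne value mex 1 hv (by omega) (by omega))]
      ring
  · -- every shifted B term is A's init (k = value - 1) or A's term at j = k + 1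
    intro x hx
    obtain ⟨k, hk, rfl⟩ := List.mem_map.1 hx
    have hkb := (PySem.List.mem_pyRange_one).1 hk
    by_cases hk1 : k = value - 1
    · left
      subst hk1
      have e1 : mex + 1 + (value - 1) = mex + value := by ring
      rw [e1, pymod_add_value value mex hv, getD_modify_sub, if_pos rfl]
      ring
    · right
      refine List.mem_map.2 ⟨k + 1, PySem.List.mem_pyRange_one.2 ⟨by omega, by omega⟩, ?_⟩
      have e1 : mex + 1 + k = mex + (k + 1) := by ring
      rw [e1, getD_modify_sub,
        if_neg (pymod_add_ne value mex (k + 1) hv (by omega) (by omega))]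
      ring
  · -- A's init appears among the shifted B terms (at k = value - 1)
    right
    refine List.mem_map.2 ⟨value - 1, PySem.List.mem_pyRange_one.2 ⟨by omega, by omega⟩, ?_⟩
    have e1 : mex + 1 + (value - 1) = mex + value := by ring
    rw [e1, pymod_add_value value mex hv, getD_modify_sub, if_pos rfl]
    ring
  · -- every A term is among the shifted B terms
    intro x hx
    obtain ⟨j, hj, rfl⟩ := List.mem_map.1 hx
    have hjb := (PySem.List.mem_pyRange_one).1 hj
    by_cases hj0 : j = 0
    · right
      subst hj0
      refine List.mem_map.2 ⟨value - 1, PySem.List.mem_pyRange_one.2 ⟨by omega, by omega⟩, ?_⟩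
      have e1 : mex + 1 + (value - 1) = mex + value := by ring
      rw [e1, pymod_add_value value mex hv, getD_modify_sub, if_pos rfl,
        show mex + 0 = mex from by ring]
      ring
    · right
      refine List.mem_map.2 ⟨j - 1, PySem.List.mem_pyRange_one.2 ⟨by omega, by omega⟩, ?_⟩
      have e1 : mex + 1 + (j - 1) = mex + j := by ring
      rw [e1, getD_modify_sub,
        if_neg (pymod_add_ne value mex j hv (by omega) (by omega))]
      ring

lemma winSum_step (d : PySem.Dict Int Int) (value mex : Int) (hv : 0 < value)
    (_hpos : 0 < d.getD (PySem.Int.mod mex value) 0) :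
    winSum (d.modify (PySem.Int.mod mex value) 0 (· - 1)) value (mex + 1)
      = winSum d value mex - 1 := by
  unfold winSum
  have hsplit : PySem.List.pyRange 0 value 1
      = PySem.List.pyRange 0 (value - 1) 1 ++ [value - 1] := by
    have h := PySem.List.pyRange_one_succ_right (a := 0) (b := value - 1) (by omega)
    rw [show value - 1 + 1 = value from by ring] at h
    exact h
  conv_lhs => rw [hsplit]
  rw [PySem.List.pyRange_one_cons hv]
  simp only [List.map_append, List.sum_append, List.map_cons, List.map_nil, List.sum_cons,
    List.sum_nil, zero_add]
  have hlast : (d.modify (PySem.Int.mod mex value) 0 (· - 1)).getD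
      (PySem.Int.mod (mex + 1 + (value - 1)) value) 0
      = d.getD (PySem.Int.mod mex value) 0 - 1 := by
    have e1 : mex + 1 + (value - 1) = mex + value := by ring
    rw [e1, pymod_add_value value mex hv, getD_modify_sub, if_pos rfl]
  rw [hlast, show mex + 0 = mex from by ring]
  have hmid : ((PySem.List.pyRange 0 (value - 1) 1).map
      (fun j => (d.modify (PySem.Int.mod mex value) 0 (· - 1)).getD
        (PySem.Int.mod (mex + 1 + j) value) 0)).sum
      = ((PySem.List.pyRange 1 value 1).map
        (fun j => d.getD (PySem.Int.mod (mex + j) value) 0)).sum := by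
    rw [PySem.List.pyRange_one 0 (value - 1), PySem.List.pyRange_one 1 value,
      List.map_map, List.map_map, show value - 1 - 0 = value - 1 from by ring]
    refine congrArg List.sum (List.map_congr_left ?_)
    intro k hk
    have hkb : (k : Int) < value - 1 := by
      have := List.mem_range.1 hk
      omega
    simp only [Function.comp_def]
    have e1 : mex + 1 + (0 + (k : Int)) = mex + (1 + (k : Int)) := by ring
    rw [e1, getD_modify_sub,
      if_neg (pymod_add_ne value mex (1 + (k : Int)) hv (by omega) (by omega))]
  rw [hmid]
  ring

lemma nonneg_step (d : PySem.Dict Int Int) (t0 : Int)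
    (hnn : ∀ t, 0 ≤ d.getD t 0) (hpos : 0 < d.getD t0 0) :
    ∀ t, 0 ≤ (d.modify t0 0 (· - 1)).getD t 0 := by
  intro t
  rw [getD_modify_sub]
  split
  · omega
  · exact hnn t

lemma mexLoopA_eq (value : Int) (hv : 0 < value) :
    ∀ (fuel : Nat) (d : PySem.Dict Int Int) (mex : Int),
      (∀ t, 0 ≤ d.getD t 0) → winSum d value mex < (fuel : Int) →
      mexLoopA value d mex fuel = mex + gapMin d value mex
  | 0, d, mex, hnn, hfuel => by
    exact absurd (winSum_nonneg d value mex hnn) (by push_cast at hfuel; omega)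
  | fuel + 1, d, mex, hnn, hfuel => by
    simp only [mexLoopA]
    by_cases h : d.getD (PySem.Int.mod mex value) 0 > 0
    · rw [if_pos h]
      rw [mexLoopA_eq value hv fuel _ (mex + 1) (nonneg_step d _ hnn h)
        (by rw [winSum_step d value mex hv h]; push_cast at hfuel ⊢; omega)]
      rw [gapMin_step d value mex hv h]
      ring
    · rw [if_neg h]
      rw [gapMin_zero d value mex hv (le_antisymm (not_lt.1 h) (hnn _)) hnn]
      ring

lemma mexLoopA_le (value : Int) (hv : 0 < value) :
    ∀ (fuel : Nat) (d : PySem.Dict Int Int) (mex : Int),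
      (∀ t, 0 ≤ d.getD t 0) →
      mexLoopA value d mex fuel ≤ mex + winSum d value mex
  | 0, d, mex, hnn => by
    simp only [mexLoopA]
    have := winSum_nonneg d value mex hnn
    omega
  | fuel + 1, d, mex, hnn => by
    simp only [mexLoopA]
    by_cases h : d.getD (PySem.Int.mod mex value) 0 > 0
    · rw [if_pos h]
      have ih := mexLoopA_le value hv fuel
        (d.modify (PySem.Int.mod mex value) 0 (· - 1)) (mex + 1) (nonneg_step d _ hnn h)
      rw [winSum_step d value mex hv h] at ih
      omega
    · rw [if_neg h]
      have := winSum_nonneg d value mex hnn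
      omega

-- sum of counts of pairwise-distinct values is at most the length
lemma sum_count_le_length (vs : List Int) (hnd : vs.Nodup) :
    ∀ l : List Int, (vs.map (fun v => (l.count v : Int))).sum ≤ (l.length : Int)
  | [] => by simp
  | x :: l => by
    have ih := sum_count_le_length vs hnd l
    have hc : vs.count x ≤ 1 := List.nodup_iff_count_le_one.1 hnd x
    have e : (vs.map (fun v => ((x :: l).count v : Int))).sum
        = (vs.map (fun v => (l.count v : Int))).sum
          + (vs.map (fun v => if v = x then (1 : Int) else 0)).sum := by
      rw [← PySem.List.sum_map_add_int]
      refine congrArg List.sum (List.map_congr_left ?_)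
      intro v _
      by_cases hvx : v = x
      · simp [hvx]
      · simp only [List.count_cons, beq_iff_eq]
        rw [if_neg (fun h => hvx h.symm), if_neg hvx]
        push_cast
        ring
    rw [e]
    have hite : (vs.map (fun v => if v = x then (1 : Int) else 0)).sum
        = (vs.countP (fun v => v == x) : Int) := by
      rw [← PySem.List.sum_map_ite_one_zero]
      refine congrArg List.sum (List.map_congr_left ?_)
      intro v _
      simp [beq_iff_eq]
    rw [hite]
    have : vs.countP (fun v => v == x) = vs.count x := rfl
    rw [this]
    simp only [List.length_cons]
    push_cast
    omega

lemma counterA_eq (nums : List Int) (value : Int) :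
    nums.foldl (fun d num => d.modify (PySem.Int.mod num value) 0 (· + 1)) PySem.Dict.empty
      = PySem.Dict.counter (nums.map (fun num => PySem.Int.mod num value)) := by
  rw [PySem.Dict.counter_eq_foldl, List.foldl_map]

lemma winSum_counter_le (nums : List Int) (value : Int) (hv : 0 < value) :
    winSum (PySem.Dict.counter (nums.map (fun num => PySem.Int.mod num value))) value 0
      ≤ (nums.length : Int) := by
  unfold winSum
  have e : ((PySem.List.pyRange 0 value 1).map
      (fun j => (PySem.Dict.counter (nums.map (fun num => PySem.Int.mod num value))).getD
        (PySem.Int.mod (0 + j) value) 0)).sum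
      = (((PySem.List.pyRange 0 value 1).map (fun j => PySem.Int.mod j value)).map
        (fun v => ((nums.map (fun num => PySem.Int.mod num value)).count v : Int))).sum := by
    rw [List.map_map]
    refine congrArg List.sum (List.map_congr_left ?_)
    intro j _
    simp only [Function.comp_def, zero_add]
    rw [PySem.Dict.getD_counter]
  rw [e]
  have hnd : ((PySem.List.pyRange 0 value 1).map (fun j => PySem.Int.mod j value)).Nodup := by
    refine List.Nodup.map_on ?_ (PySem.List.nodup_pyRange_one 0 value)
    intro a ha b hb hab
    have hab' := (pymod_eq_pymod_iff value a b hv).1 hab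
    have haB := (PySem.List.mem_pyRange_one).1 ha
    have hbB := (PySem.List.mem_pyRange_one).1 hb
    have hz : a - b = 0 := Int.eq_zero_of_abs_lt_dvd hab' (by rw [abs_lt]; omega)
    omega
  have := sum_count_le_length _ hnd (nums.map (fun num => PySem.Int.mod num value))
  simpa using this

-- the full-range minimum equals the range capped at n+1, provided the minimum is ≤ n
lemma gapMin_capped (d : PySem.Dict Int Int) (value : Int) (hv : 0 < value) (n : Int)
    (hn : 0 ≤ n) (hnn : ∀ t, 0 ≤ d.getD t 0) (hG : gapMin d value 0 ≤ n) :
    gapMin d value 0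
      = ((PySem.List.pyRange 1 (min value (n + 1)) 1).map
          (fun j => d.getD (PySem.Int.mod j value) 0 * value + j)).foldl min
        (d.getD (PySem.Int.mod 0 value) 0 * value) := by
  have hm1 : (1 : Int) ≤ min value (n + 1) := le_min (by omega) (by omega)
  have hmav : min value (n + 1) ≤ value := min_le_left _ _
  have key : gapMin d value 0
      = ((PySem.List.pyRange (min value (n + 1)) value 1).map
          (fun j => d.getD (PySem.Int.mod j value) 0 * value + j)).foldl min
        (((PySem.List.pyRange 1 (min value (n + 1)) 1).map
          (fun j => d.getD (PySem.Int.mod j value) 0 * value + j)).foldl min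
          (d.getD (PySem.Int.mod 0 value) 0 * value)) := by
    unfold gapMin
    simp only [zero_add]
    rw [PySem.List.pyRange_one_cons hv, List.map_cons, List.foldl_cons]
    simp only [zero_add, add_zero, min_self]
    rw [PySem.List.pyRange_one_append 1 (min value (n + 1)) value hm1 hmav,
      List.map_append, List.foldl_append]
  rw [key] at hG ⊢
  rcases PySem.List.foldl_min_mem
      ((PySem.List.pyRange (min value (n + 1)) value 1).map
        (fun j => d.getD (PySem.Int.mod j value) 0 * value + j))
      (((PySem.List.pyRange 1 (min value (n + 1)) 1).map
        (fun j => d.getD (PySem.Int.mod j value) 0 * value + j)).foldl min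
        (d.getD (PySem.Int.mod 0 value) 0 * value)) with h | h
  · exact h
  · exfalso
    obtain ⟨r, hr, he⟩ := List.mem_map.1 h
    have hrb := (PySem.List.mem_pyRange_one).1 hr
    have hmul : 0 ≤ d.getD (PySem.Int.mod r value) 0 * value :=
      mul_nonneg (hnn _) (by omega)
    rcases min_cases value (n + 1) with ⟨hmeq, hle⟩ | ⟨hmeq, hlt⟩ <;> rw [hmeq] at hrb <;> omega

-- B's port, unfolded to the same capped min-fold (for 0 ≤ j < value, j's residue class is j)
lemma alt_eq (nums : List Int) (value : Int) (hv : 0 < value) :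
    findMaximumMEX_alt nums value
      = ((PySem.List.pyRange 1 (min value ((nums.length : Int) + 1)) 1).map
          (fun j => (PySem.Dict.counter (nums.map (fun num => PySem.Int.mod num value))).getD
            (PySem.Int.mod j value) 0 * value + j)).foldl min
        ((PySem.Dict.counter (nums.map (fun num => PySem.Int.mod num value))).getD
          (PySem.Int.mod 0 value) 0 * value) := by
  have hm : (0 : Int) < min value ((nums.length : Int) + 1) := lt_min hv (by positivity)
  unfold findMaximumMEX_alt
  rw [PySem.List.pyRange_one_cons hm, List.map_cons, PySem.List.min?_id_cons]
  have hmod0 : PySem.Int.mod (0 : Int) value = 0 := pymod_self value 0 hv le_rfl hv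
  simp only [hmod0, add_zero]
  refine congrArg₂ _ rfl (List.map_congr_left ?_)
  intro j hj
  have hjb := (PySem.List.mem_pyRange_one).1 hj
  have hjv : j < value := lt_of_lt_of_le hjb.2 (min_le_left _ _)
  rw [pymod_self value j hv (by omega) hjv]

-- ===== VERDICT (by name: the statement is the Claim_ definition above) =====
theorem findMaximumMEX_spec : Claim_equal_findMaximumMEX := by
  intro nums value _ hv
  unfold Spec_findMaximumMEX findMaximumMEX
  rw [counterA_eq]
  have hnn : ∀ t, 0 ≤ (PySem.Dict.counter
      (nums.map (fun num => PySem.Int.mod num value))).getD t 0 := by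
    intro t
    rw [PySem.Dict.getD_counter]
    positivity
  have hS := winSum_counter_le nums value hv
  have hloop := mexLoopA_eq value hv (nums.length + 1)
    (PySem.Dict.counter (nums.map (fun num => PySem.Int.mod num value))) 0 hnn
    (by push_cast; omega)
  have hle := mexLoopA_le value hv (nums.length + 1)
    (PySem.Dict.counter (nums.map (fun num => PySem.Int.mod num value))) 0 hnn
  rw [hloop]
  have hG : gapMin (PySem.Dict.counter (nums.map (fun num => PySem.Int.mod num value))) value 0
      ≤ (nums.length : Int) := by omega
  rw [alt_eq nums value hv, zero_add]
  exact gapMin_capped _ value hv (nums.length : Int) (by positivity) hnn hG
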